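-- pv_equiv track=rewrite | github.com/chandueddala/Migration_Oracle_Sql-v-2- | agents/root_cause_analyzer.py | _parse_oracle_analysis
-- ===== SOURCE A (Python) =====
-- from typing import Dict, Any, List, Optional
--
-- def _parse_oracle_analysis(response: str) -> Dict[str, Any]:
--     """Parse Oracle code analysis"""
--     lines = response.strip().split('\n')
--     result = {
--         "features": [],
--         "complex_constructs": [],
--         "data_types": [],
--         "dependencies": []
--     }
--
--     for line in lines:
--         line = line.strip()
--         if line.startswith("FEATURES:"):
--             features = line.split(":", 1)[1].strip()
--             result["features"] = [f.strip() for f in features.split(",")]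
--         elif line.startswith("COMPLEX_CONSTRUCTS:"):
--             constructs = line.split(":", 1)[1].strip()
--             result["complex_constructs"] = [c.strip() for c in constructs.split(",")]
--         elif line.startswith("DATA_TYPES:"):
--             types = line.split(":", 1)[1].strip()
--             result["data_types"] = [t.strip() for t in types.split(",")]
--         elif line.startswith("DEPENDENCIES:"):
--             deps = line.split(":", 1)[1].strip()
--             result["dependencies"] = [d.strip() for d in deps.split(",")]
--
--     return result
-- ===== SOURCE B (Python) =====
-- def _parse_oracle_analysis(response: str):
--     """Parse Oracle code analysis.
--
--     Staged decomposition: pre-strip all lines once, then for each of the four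
--     known section prefixes scan the lines back-to-front and parse the first
--     (i.e. last-in-file) matching line; absent sections keep [].
--     """
--     lines = [raw.strip() for raw in response.strip().split('\n')]
--
--     def last_section(prefix):
--         for line in reversed(lines):
--             if line.startswith(prefix):
--                 return [x.strip() for x in line[len(prefix):].strip().split(',')]
--         return []
--
--     return {
--         "features": last_section("FEATURES:"),
--         "complex_constructs": last_section("COMPLEX_CONSTRUCTS:"),
--         "data_types": last_section("DATA_TYPES:"),
--         "dependencies": last_section("DEPENDENCIES:"),
--     }
-- ===== Notes on version B (the rewrite author's own statement) =====
-- stated objective: alternative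
-- what changed: B replaces A's single forward pass with an if/elif chain over mutable per-key state by a staged decomposition: strip all lines once, then for each of the four known section prefixes scan the lines back-to-front and parse the first (i.e. last-in-file) matching line via prefix slicing instead of splitting at the first colon.
import Mathlib
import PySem

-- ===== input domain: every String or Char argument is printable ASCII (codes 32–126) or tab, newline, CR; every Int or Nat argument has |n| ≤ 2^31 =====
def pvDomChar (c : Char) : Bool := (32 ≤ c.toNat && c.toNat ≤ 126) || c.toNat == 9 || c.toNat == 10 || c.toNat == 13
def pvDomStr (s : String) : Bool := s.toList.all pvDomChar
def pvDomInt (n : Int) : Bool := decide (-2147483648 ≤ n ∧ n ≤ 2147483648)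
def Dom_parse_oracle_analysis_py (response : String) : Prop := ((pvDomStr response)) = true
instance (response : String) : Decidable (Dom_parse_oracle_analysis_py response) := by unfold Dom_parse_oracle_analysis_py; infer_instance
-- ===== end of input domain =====

-- B replaces A's single forward pass with an if/elif chain and mutable state by four staged
-- back-to-front scans, one per known section prefix, each parsing the first (= last-in-file)
-- matching line; objective: alternative decomposition, same observable result.

-- Python s.split(sep) for a nonempty separator (both ports' separators are ":" "," "\n")
def pySplit (s sep : String) : List String := (PySem.Str.split? s sep).getD []

-- ===== PORT A =====
-- line.split(":", 1)[1]; the "" fallback is unreachable in A: every caller has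
-- checked line.startswith("…:") first, so the split always has a second piece.
def pvAfterColon (line : String) : String :=
  match PySem.Str.splitMax? line ":" 1 with
  | some (_ :: second :: _) => second
  | _ => ""

-- [x.strip() for x in v.strip().split(",")]
def pvParseVal (v : String) : List String :=
  (pySplit (PySem.Str.strip v) ",").map PySem.Str.strip

def parse_oracle_analysis_py (response : String) : List (String × List String) :=
  let lines := pySplit (PySem.Str.strip response) "\n"
  let st := lines.foldl (fun st raw =>
    let line := PySem.Str.strip raw
    if PySem.Str.startswith line "FEATURES:" then
      (pvParseVal (pvAfterColon line), st.2.1, st.2.2.1, st.2.2.2)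
    else if PySem.Str.startswith line "COMPLEX_CONSTRUCTS:" then
      (st.1, pvParseVal (pvAfterColon line), st.2.2.1, st.2.2.2)
    else if PySem.Str.startswith line "DATA_TYPES:" then
      (st.1, st.2.1, pvParseVal (pvAfterColon line), st.2.2.2)
    else if PySem.Str.startswith line "DEPENDENCIES:" then
      (st.1, st.2.1, st.2.2.1, pvParseVal (pvAfterColon line))
    else st)
    (([] : List String), ([] : List String), ([] : List String), ([] : List String))
  [("features", st.1), ("complex_constructs", st.2.1),
   ("data_types", st.2.2.1), ("dependencies", st.2.2.2)]

-- ===== PORT B =====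
-- for line in reversed(lines): if line.startswith(prefix): return [x.strip() for x in line[len(prefix):].strip().split(',')]; else []
def pvLastSection (lines : List String) (pre : String) : List String :=
  match lines.reverse.find? (fun line => PySem.Str.startswith line pre) with
  | some line =>
      (pySplit (PySem.Str.strip (PySem.Str.slice line (some (PySem.Str.len pre)) none)) ",").map PySem.Str.strip
  | none => []

def parse_oracle_analysis_py_alt (response : String) : List (String × List String) :=
  let lines := (pySplit (PySem.Str.strip response) "\n").map PySem.Str.strip
  [("features", pvLastSection lines "FEATURES:"),
   ("complex_constructs", pvLastSection lines "COMPLEX_CONSTRUCTS:"),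
   ("data_types", pvLastSection lines "DATA_TYPES:"),
   ("dependencies", pvLastSection lines "DEPENDENCIES:")]

-- ===== PRECONDITION & SPEC =====
def Spec_parse_oracle_analysis_py (response : String) (out : List (String × List String)) : Prop := out = parse_oracle_analysis_py_alt response
instance (response : String) (out : List (String × List String)) : Decidable (Spec_parse_oracle_analysis_py response out) := by unfold Spec_parse_oracle_analysis_py; infer_instance

-- ===== CLAIM (what is proved, stated in full; the proofs are below) =====
def Claim_equal_parse_oracle_analysis_py : Prop := ∀ (response : String), Dom_parse_oracle_analysis_py response → Spec_parse_oracle_analysis_py response (parse_oracle_analysis_py response)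

-- ===== LEMMAS AND PROOFS =====

-- a line that starts with one section prefix starts with no other (no prefix is a prefix of another)
theorem pvStartswith_excl {line P Q : String}
    (h : PySem.Str.startswith line P = true)
    (hPQ : ¬ (P.toList <+: Q.toList)) (hQP : ¬ (Q.toList <+: P.toList)) :
    PySem.Str.startswith line Q = false := by
  by_contra hc
  have hQ : PySem.Str.startswith line Q = true := by
    cases hq : PySem.Str.startswith line Q
    · exact absurd hq hc
    · rfl
  have h1 : P.toList <+: line.toList := by
    have := PySem.Chars.startswith_iff (s := line.toList) (p := P.toList)
    simpa [PySem.Str.startswith] using this.mp (by simpa [PySem.Str.startswith] using h)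
  have h2 : Q.toList <+: line.toList := by
    have := PySem.Chars.startswith_iff (s := line.toList) (p := Q.toList)
    simpa [PySem.Str.startswith] using this.mp (by simpa [PySem.Str.startswith] using hQ)
  rcases List.prefix_or_prefix_of_prefix h1 h2 with hh | hh
  · exact hPQ hh
  · exact hQP hh

-- splitOnMax.go with maxsplit budget 1 on a list K ++ ':' :: rest (no ':' in K)
theorem pvGo_m_zero (fuel : Nat) (l cur : List Char) (acc : List (List Char)) :
    PySem.Chars.splitOnMax.go [':'] fuel 0 l cur acc = ((cur.reverse ++ l) :: acc).reverse := by
  cases fuel with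
  | zero => simp [PySem.Chars.splitOnMax.go]
  | succ f =>
      cases l with
      | nil => simp [PySem.Chars.splitOnMax.go]
      | cons c rest => simp [PySem.Chars.splitOnMax.go]

theorem pvGo_split (K : List Char) : ∀ (fuel : Nat) (rest cur : List Char) (acc : List (List Char)),
    ':' ∉ K → K.length < fuel →
    PySem.Chars.splitOnMax.go [':'] fuel 1 (K ++ ':' :: rest) cur acc
      = acc.reverse ++ [cur.reverse ++ K, rest] := by
  induction K with
  | nil =>
      intro fuel rest cur acc _ hf
      cases fuel with
      | zero => omega
      | succ f =>
          simp [PySem.Chars.splitOnMax.go, List.isPrefixOf, pvGo_m_zero]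
  | cons c K ih =>
      intro fuel rest cur acc hK hf
      cases fuel with
      | zero => simp at hf
      | succ f =>
          have hc : c ≠ ':' := by
            intro h; exact hK (by simp [h])
          have hpre : [':'].isPrefixOf (c :: (K ++ ':' :: rest)) = false := by
            simp [List.isPrefixOf]
            intro h; exact absurd h.symm hc
          have hK' : ':' ∉ K := fun h => hK (List.mem_cons_of_mem _ h)
          have hf' : K.length < f := by simpa using Nat.lt_of_succ_lt_succ hf
          simp only [List.cons_append, PySem.Chars.splitOnMax.go, hpre]
          rw [if_neg (by simp), if_neg (by simp)]
          rw [ih f rest (c :: cur) acc hK' hf']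
          simp

-- on a matching line, A's line.split(":",1)[1] is B's line[len(pre):]
theorem pvAfterColon_eq_slice (pre line : String) (K : List Char)
    (hpre : pre.toList = K ++ [':']) (hK : ':' ∉ K)
    (h : PySem.Str.startswith line pre = true) :
    pvAfterColon line = PySem.Str.slice line (some (PySem.Str.len pre)) none := by
  have hpref : pre.toList <+: line.toList := by
    have := PySem.Chars.startswith_iff (s := line.toList) (p := pre.toList)
    exact this.mp (by simpa [PySem.Str.startswith] using h)
  obtain ⟨rest, hrest⟩ := hpref
  have hline : line.toList = K ++ ':' :: rest := by
    rw [← hrest, hpre]; simp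
  -- A's side
  have hsplit : PySem.Chars.splitOnMax line.toList [':'] 1 = [K, rest] := by
    rw [hline]
    unfold PySem.Chars.splitOnMax
    rw [if_neg (by omega)]
    have h1 : ((1 : Int)).toNat = 1 := rfl
    rw [h1, pvGo_split K ((K ++ ':' :: rest).length + 1) rest [] []
        hK (by simp)]
    simp
  have hA : pvAfterColon line = String.ofList rest := by
    unfold pvAfterColon
    have hs : PySem.Str.splitMax? line ":" 1
        = some ((PySem.Chars.splitOnMax line.toList [':'] 1).map String.ofList) := by
      simp [PySem.Str.splitMax?, PySem.Chars.splitMax?]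
    rw [hs, hsplit]
    rfl
  -- B's side
  have hlen : PySem.Str.len pre = ((K.length + 1 : Nat) : Int) := by
    simp only [PySem.Str.len]
    rw [hpre]; simp
  have hB : (PySem.Str.slice line (some (PySem.Str.len pre)) none).toList = rest := by
    rw [PySem.Str.toList_slice]
    simp only [PySem.Chars.slice_eq_listSlice, hlen]
    rw [PySem.List.slice_from _ (by positivity)]
    rw [hline, Int.toNat_natCast]
    have : K ++ ':' :: rest = (K ++ [':']) ++ rest := by simp
    rw [this]
    have hlen2 : K.length + 1 = (K ++ [':']).length := by simp
    rw [hlen2, List.drop_left]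
  apply String.toList_inj.mp
  rw [hA, hB, String.toList_ofList]

-- generic: one component of A's left fold equals the first match of a back-to-front scan
theorem pvFoldl_comp {S : Type} (p : String → Bool) (g : String → List String)
    (step : S → String → S) (proj : S → List String)
    (hT : ∀ st raw, p (PySem.Str.strip raw) = true → proj (step st raw) = g (PySem.Str.strip raw))
    (hF : ∀ st raw, p (PySem.Str.strip raw) = false → proj (step st raw) = proj st) :
    ∀ (ls : List String) (st : S),
    proj (ls.foldl step st)
      = match ((ls.map PySem.Str.strip).reverse.find? p) with
        | some line => g line
        | none => proj st := by
  intro ls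
  induction ls with
  | nil => intro st; simp
  | cons raw ls ih =>
      intro st
      simp only [List.foldl_cons, List.map_cons, List.reverse_cons, List.find?_append]
      rw [ih]
      cases hfind : (ls.map PySem.Str.strip).reverse.find? p with
      | some l => simp [Option.or]
      | none =>
          cases hp : p (PySem.Str.strip raw) with
          | true => simp [Option.or, List.find?, hp, hT st raw hp]
          | false => simp [Option.or, List.find?, hp, hF st raw hp]

-- B's per-prefix scan, restated through the generic fold lemma's right-hand side
theorem pvLastSection_eq (ls : List String) (pre : String) (K : List Char)
    (hpre : pre.toList = K ++ [':']) (hK : ':' ∉ K) :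
    pvLastSection (ls.map PySem.Str.strip) pre
      = match ((ls.map PySem.Str.strip).reverse.find? (fun line => PySem.Str.startswith line pre)) with
        | some line => pvParseVal (pvAfterColon line)
        | none => [] := by
  unfold pvLastSection
  cases hfind : (ls.map PySem.Str.strip).reverse.find? (fun line => PySem.Str.startswith line pre) with
  | none => rfl
  | some line =>
      have hmatch : PySem.Str.startswith line pre = true := by
        have := List.find?_some hfind
        simpa using this
      have heq := pvAfterColon_eq_slice pre line K hpre hK hmatch
      simp [pvParseVal, heq]

-- ===== VERDICT (by name: the statement is the Claim_ definition above) =====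
theorem parse_oracle_analysis_py_spec : Claim_equal_parse_oracle_analysis_py := by
  intro response _
  unfold Spec_parse_oracle_analysis_py parse_oracle_analysis_py parse_oracle_analysis_py_alt
  simp only []
  set ls := pySplit (PySem.Str.strip response) "\n" with hls
  set step := (fun (st : List String × List String × List String × List String) (raw : String) =>
    let line := PySem.Str.strip raw
    if PySem.Str.startswith line "FEATURES:" then
      (pvParseVal (pvAfterColon line), st.2.1, st.2.2.1, st.2.2.2)
    else if PySem.Str.startswith line "COMPLEX_CONSTRUCTS:" then
      (st.1, pvParseVal (pvAfterColon line), st.2.2.1, st.2.2.2)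
    else if PySem.Str.startswith line "DATA_TYPES:" then
      (st.1, st.2.1, pvParseVal (pvAfterColon line), st.2.2.2)
    else if PySem.Str.startswith line "DEPENDENCIES:" then
      (st.1, st.2.1, st.2.2.1, pvParseVal (pvAfterColon line))
    else st) with hstep
  have eF : ∀ line, PySem.Str.startswith line "COMPLEX_CONSTRUCTS:" = true →
      PySem.Str.startswith line "FEATURES:" = false :=
    fun line h => pvStartswith_excl h (by decide) (by decide)
  have eF2 : ∀ line, PySem.Str.startswith line "DATA_TYPES:" = true →
      PySem.Str.startswith line "FEATURES:" = false :=
    fun line h => pvStartswith_excl h (by decide) (by decide)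
  have eF3 : ∀ line, PySem.Str.startswith line "DEPENDENCIES:" = true →
      PySem.Str.startswith line "FEATURES:" = false :=
    fun line h => pvStartswith_excl h (by decide) (by decide)
  have eC2 : ∀ line, PySem.Str.startswith line "DATA_TYPES:" = true →
      PySem.Str.startswith line "COMPLEX_CONSTRUCTS:" = false :=
    fun line h => pvStartswith_excl h (by decide) (by decide)
  have eC3 : ∀ line, PySem.Str.startswith line "DEPENDENCIES:" = true →
      PySem.Str.startswith line "COMPLEX_CONSTRUCTS:" = false :=
    fun line h => pvStartswith_excl h (by decide) (by decide)
  have eD3 : ∀ line, PySem.Str.startswith line "DEPENDENCIES:" = true →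
      PySem.Str.startswith line "DATA_TYPES:" = false :=
    fun line h => pvStartswith_excl h (by decide) (by decide)
  have h1 := pvFoldl_comp (fun line => PySem.Str.startswith line "FEATURES:")
    (fun line => pvParseVal (pvAfterColon line)) step (fun st => st.1)
    (by intro st raw h; simp only [hstep, h, if_pos]; )
    (by
      intro st raw h
      simp only [hstep]
      split_ifs with h1 h2 h3 h4 <;> simp_all)
    ls ([], [], [], [])
  have h2 := pvFoldl_comp (fun line => PySem.Str.startswith line "COMPLEX_CONSTRUCTS:")
    (fun line => pvParseVal (pvAfterColon line)) step (fun st => st.2.1)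
    (by
      intro st raw h
      simp only [hstep, eF _ h, Bool.false_eq_true, if_false, h, if_pos])
    (by
      intro st raw h
      simp only [hstep]
      split_ifs with h1 h2 h3 h4 <;> simp_all)
    ls ([], [], [], [])
  have h3 := pvFoldl_comp (fun line => PySem.Str.startswith line "DATA_TYPES:")
    (fun line => pvParseVal (pvAfterColon line)) step (fun st => st.2.2.1)
    (by
      intro st raw h
      simp only [hstep, eF2 _ h, eC2 _ h, Bool.false_eq_true, if_false, h, if_pos])
    (by
      intro st raw h
      simp only [hstep]
      split_ifs with h1 h2 h3 h4 <;> simp_all)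
    ls ([], [], [], [])
  have h4 := pvFoldl_comp (fun line => PySem.Str.startswith line "DEPENDENCIES:")
    (fun line => pvParseVal (pvAfterColon line)) step (fun st => st.2.2.2)
    (by
      intro st raw h
      simp only [hstep, eF3 _ h, eC3 _ h, eD3 _ h, Bool.false_eq_true, if_false, h, if_pos])
    (by
      intro st raw h
      simp only [hstep]
      split_ifs with h1 h2 h3 h4 <;> simp_all)
    ls ([], [], [], [])
  rw [pvLastSection_eq ls "FEATURES:" "FEATURES".toList (by decide) (by decide)]
  rw [pvLastSection_eq ls "COMPLEX_CONSTRUCTS:" "COMPLEX_CONSTRUCTS".toList (by decide) (by decide)]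
  rw [pvLastSection_eq ls "DATA_TYPES:" "DATA_TYPES".toList (by decide) (by decide)]
  rw [pvLastSection_eq ls "DEPENDENCIES:" "DEPENDENCIES".toList (by decide) (by decide)]
  rw [h1, h2, h3, h4]
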